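-- pv_equiv track=rewrite | github.com/obichan117/pybrisk | scripts/binary_decoder.py | _build_tick_table
-- ===== SOURCE A (Python) =====
-- def _build_tick_table(bands):
--     """Precompute tick table from band definitions.
--
--     Returns list of (band_start_tick, band_start_price10, tick_size_price10, virtual_offset).
--     virtual_offset is precomputed so that: price10 = tick_size * (tick_index - virtual_offset).
--     """
--     table = []
--     cumulative_ticks = 0
--     cumulative_price10 = 0
--     for upper_price10, tick_size in bands:
--         ticks_in_band = (upper_price10 - cumulative_price10) // tick_size
--         virtual_offset = cumulative_ticks - cumulative_price10 // tick_size
--         table.append((cumulative_ticks, cumulative_price10, tick_size, virtual_offset))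
--         cumulative_ticks += ticks_in_band
--         cumulative_price10 = upper_price10
--     return table
-- ===== SOURCE B (Python) =====
-- def _build_tick_table(bands):
--     """Precompute tick table from band definitions.
--
--     Different algorithm: each row is computed independently from first
--     principles (no running state) -- the band start is read off the previous
--     band's upper bound, and the cumulative tick index is recomputed as an
--     explicit sum over all preceding bands.  O(n^2) brute force vs A's O(n)
--     single stateful pass; correct because A's accumulators are exactly these
--     per-row closed forms.
--     """
--     def start(i):
--         return bands[i - 1][0] if i else 0
--
--     def cum(i):
--         return sum((bands[j][0] - start(j)) // bands[j][1] for j in range(i))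
--
--     return [(cum(i), start(i), tick, cum(i) - start(i) // tick)
--             for i, (_, tick) in enumerate(bands)]
-- ===== Notes on version B (the rewrite author's own statement) =====
-- stated objective: alternative
-- what changed: Replaces A's single stateful loop carrying running cumulative ticks/price with a per-row direct computation: each row is built independently, re-deriving its band start from the previous band's upper and its cumulative tick index as an explicit sum over all preceding bands (O(n^2) brute force, no state threaded between rows).
import Mathlib
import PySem

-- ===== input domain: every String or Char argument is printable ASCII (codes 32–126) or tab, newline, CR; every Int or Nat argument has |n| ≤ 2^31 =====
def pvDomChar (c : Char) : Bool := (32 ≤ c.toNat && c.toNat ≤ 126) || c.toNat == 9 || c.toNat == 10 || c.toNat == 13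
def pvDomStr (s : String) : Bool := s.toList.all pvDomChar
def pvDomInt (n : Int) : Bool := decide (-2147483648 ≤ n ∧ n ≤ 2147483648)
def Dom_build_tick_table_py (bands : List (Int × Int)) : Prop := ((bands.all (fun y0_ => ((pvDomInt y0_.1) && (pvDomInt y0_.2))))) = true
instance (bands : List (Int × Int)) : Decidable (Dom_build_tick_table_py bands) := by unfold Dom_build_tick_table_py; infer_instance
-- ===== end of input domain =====

-- B computes each table row independently (band start read from the previous band, cumulative ticks recomputed as an explicit sum over the preceding bands) instead of A's single stateful accumulator loop; different algorithm (O(n^2) vs O(n)), not faster.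

-- ===== PORT A =====
def build_tick_table_py (bands : List (Int × Int)) : List (Int × Int × Int × Int) :=
  (bands.foldl
    (fun (st : List (Int × Int × Int × Int) × Int × Int) b =>
      let ticks_in_band := PySem.Int.floordiv (b.1 - st.2.2) b.2
      let virtual_offset := st.2.1 - PySem.Int.floordiv st.2.2 b.2
      (st.1 ++ [(st.2.1, st.2.2, b.2, virtual_offset)], st.2.1 + ticks_in_band, b.1))
    ([], 0, 0)).1

-- ===== PORT B =====
-- Source B's helper `start(i)`: bands[i-1][0] if i else 0 — the index i-1 is always in range
-- when called (0 < i ≤ len bands), so getD is exact here.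
def pvStartB (bands : List (Int × Int)) (i : Nat) : Int :=
  if i ≠ 0 then (bands.getD (i - 1) (0, 0)).1 else 0
-- Source B's helper `cum(i)`: sum over j in range(i) of (bands[j][0] - start(j)) // bands[j][1];
-- j < i ≤ len bands, so getD is exact here.
def pvCumB (bands : List (Int × Int)) (i : Nat) : Int :=
  ((List.range i).map (fun j =>
    PySem.Int.floordiv ((bands.getD j (0, 0)).1 - pvStartB bands j)
      (bands.getD j (0, 0)).2)).sum
-- the comprehension over enumerate(bands): row i uses tick = bands[i][1]
def build_tick_table_py_alt (bands : List (Int × Int)) : List (Int × Int × Int × Int) :=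
  (List.range bands.length).map (fun i =>
    let tick := (bands.getD i (0, 0)).2
    (pvCumB bands i, pvStartB bands i, tick,
      pvCumB bands i - PySem.Int.floordiv (pvStartB bands i) tick))

-- ===== PRECONDITION & SPEC =====
-- Pre_ excludes exactly the inputs where Python raises ZeroDivisionError (a band with tick size 0); B raises there too.
def Pre_build_tick_table_py (bands : List (Int × Int)) : Prop :=
  ∀ b ∈ bands, b.2 ≠ 0
instance (bands : List (Int × Int)) : Decidable (Pre_build_tick_table_py bands) := by
  unfold Pre_build_tick_table_py; infer_instance
def pvWitness_build_tick_table_py : (List (Int × Int)) := [(100, 1), (500, 5), (1000, 10)]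

def Spec_build_tick_table_py (bands : List (Int × Int)) (out : List (Int × Int × Int × Int)) : Prop := out = build_tick_table_py_alt bands
instance (bands : List (Int × Int)) (out : List (Int × Int × Int × Int)) : Decidable (Spec_build_tick_table_py bands out) := by unfold Spec_build_tick_table_py; infer_instance

-- ===== CLAIM (what is proved, stated in full; the proofs are below) =====
def Claim_equal_build_tick_table_py : Prop := ∀ (bands : List (Int × Int)), Dom_build_tick_table_py bands → Pre_build_tick_table_py bands → Spec_build_tick_table_py bands (build_tick_table_py bands)

-- ===== LEMMAS AND PROOFS =====

-- Reference recursion: rows for `bands` starting at cumulative ticks ct, band start cp.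
def pvRef : List (Int × Int) → Int → Int → List (Int × Int × Int × Int)
  | [], _, _ => []
  | (u, t) :: rest, ct, cp =>
      (ct, cp, t, ct - PySem.Int.floordiv cp t) ::
        pvRef rest (ct + PySem.Int.floordiv (u - cp) t) u

theorem pvA_loop (bands : List (Int × Int)) :
    ∀ (acc : List (Int × Int × Int × Int)) (ct cp : Int),
    (bands.foldl
      (fun (st : List (Int × Int × Int × Int) × Int × Int) b =>
        let ticks_in_band := PySem.Int.floordiv (b.1 - st.2.2) b.2
        let virtual_offset := st.2.1 - PySem.Int.floordiv st.2.2 b.2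
        (st.1 ++ [(st.2.1, st.2.2, b.2, virtual_offset)], st.2.1 + ticks_in_band, b.1))
      (acc, ct, cp)).1 = acc ++ pvRef bands ct cp := by
  induction bands with
  | nil => intro acc ct cp; simp [pvRef]
  | cons b rest ih =>
      intro acc ct cp
      obtain ⟨u, t⟩ := b
      simp only [List.foldl_cons]
      rw [ih]
      simp [pvRef]

-- Generalized per-row closed forms carrying the first band start s0 and base tick index c0.
def pvStartG (bands : List (Int × Int)) (s0 : Int) (i : Nat) : Int :=
  if i ≠ 0 then (bands.getD (i - 1) (0, 0)).1 else s0
def pvIncG (bands : List (Int × Int)) (s0 : Int) (j : Nat) : Int :=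
  PySem.Int.floordiv ((bands.getD j (0, 0)).1 - pvStartG bands s0 j) (bands.getD j (0, 0)).2
def pvCumG (bands : List (Int × Int)) (s0 c0 : Int) (i : Nat) : Int :=
  c0 + ((List.range i).map (pvIncG bands s0)).sum
def pvTabG (bands : List (Int × Int)) (s0 c0 : Int) : List (Int × Int × Int × Int) :=
  (List.range bands.length).map (fun i =>
    (pvCumG bands s0 c0 i, pvStartG bands s0 i, (bands.getD i (0, 0)).2,
      pvCumG bands s0 c0 i - PySem.Int.floordiv (pvStartG bands s0 i) (bands.getD i (0, 0)).2))

theorem pvStartG_cons (u t s0 : Int) (rest : List (Int × Int)) (j : Nat) :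
    pvStartG ((u, t) :: rest) s0 (j + 1) = pvStartG rest u j := by
  cases j with
  | zero => simp [pvStartG]
  | succ k => simp [pvStartG]

theorem pvIncG_cons (u t s0 : Int) (rest : List (Int × Int)) (j : Nat) :
    pvIncG ((u, t) :: rest) s0 (j + 1) = pvIncG rest u j := by
  simp [pvIncG, pvStartG_cons]

theorem pvCumG_cons (u t s0 c0 : Int) (rest : List (Int × Int)) (j : Nat) :
    pvCumG ((u, t) :: rest) s0 c0 (j + 1)
      = pvCumG rest u (c0 + PySem.Int.floordiv (u - s0) t) j := by
  unfold pvCumG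
  rw [List.range_succ_eq_map, List.map_cons, List.map_map]
  have h0 : pvIncG ((u, t) :: rest) s0 0 = PySem.Int.floordiv (u - s0) t := by
    simp [pvIncG, pvStartG]
  have hm : (List.range j).map (pvIncG ((u, t) :: rest) s0 ∘ Nat.succ)
      = (List.range j).map (pvIncG rest u) := by
    refine List.map_congr_left (fun k _ => ?_)
    simpa [Function.comp] using pvIncG_cons u t s0 rest k
  rw [hm, List.sum_cons, h0]
  ring

theorem pvTabG_eq_ref (bands : List (Int × Int)) :
    ∀ (s0 c0 : Int), pvTabG bands s0 c0 = pvRef bands c0 s0 := by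
  induction bands with
  | nil => intro s0 c0; simp [pvTabG, pvRef]
  | cons b rest ih =>
      intro s0 c0
      obtain ⟨u, t⟩ := b
      unfold pvTabG
      rw [List.length_cons, List.range_succ_eq_map, List.map_cons, List.map_map]
      have hrow0 : pvCumG ((u, t) :: rest) s0 c0 0 = c0 := by simp [pvCumG]
      have hmap : (List.range rest.length).map
          ((fun i => (pvCumG ((u, t) :: rest) s0 c0 i, pvStartG ((u, t) :: rest) s0 i,
              ((((u, t) :: rest)).getD i (0, 0)).2,
              pvCumG ((u, t) :: rest) s0 c0 i -
                PySem.Int.floordiv (pvStartG ((u, t) :: rest) s0 i)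
                  ((((u, t) :: rest)).getD i (0, 0)).2)) ∘ Nat.succ)
          = pvTabG rest u (c0 + PySem.Int.floordiv (u - s0) t) := by
        unfold pvTabG
        refine List.map_congr_left (fun k _ => ?_)
        simp only [Function.comp]
        rw [pvStartG_cons, pvCumG_cons]
        simp
      rw [hmap, ih]
      simp [pvRef, hrow0, pvStartG]

theorem pvAlt_eq_tabG (bands : List (Int × Int)) :
    build_tick_table_py_alt bands = pvTabG bands 0 0 := by
  unfold build_tick_table_py_alt pvTabG
  refine List.map_congr_left (fun i _ => ?_)
  have hs : pvStartB bands i = pvStartG bands 0 i := rfl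
  have hc : pvCumB bands i = pvCumG bands 0 0 i := by
    unfold pvCumB pvCumG pvIncG
    rw [zero_add]
    exact congrArg _ (List.map_congr_left (fun j _ => rfl))
  simp [hs, hc]

-- ===== VERDICT (by name: the statement is the Claim_ definition above) =====
theorem build_tick_table_py_spec : Claim_equal_build_tick_table_py := by
  intro bands _ _
  show build_tick_table_py bands = build_tick_table_py_alt bands
  have hA : build_tick_table_py bands = pvRef bands 0 0 := by
    simpa using pvA_loop bands [] 0 0
  rw [hA, pvAlt_eq_tabG, pvTabG_eq_ref]
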